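/- GENERATED by farm/worked/mk_tree_copies.py from farm/worked/get8/Proof.lean (a worked proof of the farm's unit `get8`,
   accepted by the verdict) — do not edit. -/
import Asan.CheckWalk
import Vorbis.Spec.Units.get8

open X86 X86.User Asan Vorbis

set_option maxRecDepth 4000
set_option maxHeartbeats 4000000

/-- `get8(f)` satisfies its contract: two loads of fields of `*f`, then either `*z->stream++` (a byte of the input) or `z->eof = 1`;
two paths to ONE `ret`, four check sites closed from `Bits.site_field` / `.site_stream_byte` with `check_site`. -/
theorem Vorbis.Spec.Worked.get8_ok : Vorbis.Spec.get8.Statement := by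
  intro Lay hLay μ hμ u₀ hcode hload8 hstore4 hload1 others frames Blk len u ret he hpre
  v_entry he
  have hsp := hpre.shadow.rsp
  have hwhere := hpre.where_obj
  -- `f`, the object's address as a number
  obtain ⟨f, hf⟩ : ∃ f : Nat, (u.reg .rdi).toNat = f := ⟨_, rfl⟩
  have hr : u.reg .rdi = addr f := eq_addr _ _ hf
  have hbits : Bits Blk len u.mem f := hf ▸ hpre.bits
  have hL : BlkLive Blk (Live (stackObjs frames ++ others)) := hpre.env.live
  have hp := hbits.ptr_range
  have hobr := hbits.OBR
  simp only [voff] at hobr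
  -- the two loads of the function, named
  have r48 : u.mem.readLE (addr f + 48) 8 = stb_vorbis.stream u.mem f := by
    simp only [vfield, vacc, voff]
  have r64 : u.mem.readLE (addr f + 64) 8 = stb_vorbis.stream_end u.mem f := by
    simp only [vfield, vacc, voff]
  u_walk hcode [hμ.vendor] span [Vorbis.L.textLo, Vorbis.L.textHi] side (v_side)
  · -- 0x104c6d, load8 [f + 48] (`z->stream`): a field of `*f`
    have hun : ShadowUntouched u.mem s_104c6d.mem := by v_untouched
    have hs := hbits.site_field hL 48 8 (by omega) (by omega) rfl
    exact Vorbis.Spec.check_site hpre.shadow.inv hun hs (by u_omega)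
  · -- 0x104c7a, load8 [f + 64] (`z->stream_end`): a field of `*f`
    have hun : ShadowUntouched u.mem s_104c7a.mem := by v_untouched
    have hs := hbits.site_field hL 64 8 (by omega) (by omega) rfl
    exact Vorbis.Spec.check_site hpre.shadow.inv hun hs (by u_omega)
  · -- 0x104cb2, load1 [old stream]: `stream < stream_end` (the `jb`), so the byte is inside the input
    have hlt : stb_vorbis.stream u.mem f < stb_vorbis.stream_end u.mem f := by u_omega
    have hun : ShadowUntouched u.mem s_104cb2.mem := by v_untouched
    have hs := hbits.site_stream_byte hL hlt rfl
    exact Vorbis.Spec.check_site hpre.shadow.inv hun hs (by u_omega)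
  · -- 0x104c8c, store4 [f + 136] (`z->eof`): a field of `*f`
    have hun : ShadowUntouched u.mem s_104c8c.mem := by v_untouched
    have hs := hbits.site_field hL 136 4 (by omega) (by omega) rfl
    exact Vorbis.Spec.check_site hpre.shadow.inv hun hs (by u_omega)
  · -- the path through `return *z->stream++`
    have hlt : stb_vorbis.stream u.mem f < stb_vorbis.stream_end u.mem f := by u_omega
    refine ReachVia.done ?_
    v_returned
    show Vorbis.Spec.Get8Post Blk len (u.reg .rdi).toNat u s_104ca6
    rw [hf]
    -- what the memory is now: `stream` is one further, the rest of `*f` above it reads the same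
    have hE : Mem.EqOn (f + 56) (f + 1808) u.mem s_104ca6.mem := by
      u_memnorm
      u_eqon
    have es : stb_vorbis.stream s_104ca6.mem f = stb_vorbis.stream u.mem f + 1 := by
      have e1 : s_104ca6.mem.readLE (addr f + 48) 8 = (UInt64.ofNat (stb_vorbis.stream u.mem f) + 1).toNat := by
        rw [w_mem]
        u_read
      simp only [vfield] at e1
      show s_104ca6.mem.u64 (f + 48) = _
      rw [e1]
      u_omega
    have hnew := Vorbis.Spec.Reader.bits_stream_moved hbits hE _ es (by omega) (by omega)
    have hmu := muOf_consumed (stb_vorbis.stream_end u.mem f) (stb_vorbis.stream u.mem f) (stb_vorbis.stream u.mem f + 1) 1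
      (stb_vorbis.segment_count u.mem f) (stb_vorbis.next_seg u.mem f) (stb_vorbis.bytes_in_seg u.mem f) (by omega) (by omega)
    rw [← hnew.2, ← mu_def] at hmu
    -- the value returned: the byte at the old `stream`, zero-extended
    have erax : s_104ca6.reg .rax = addr (u.mem.u8 (stb_vorbis.stream u.mem f)) := by
      rw [w_rax]
      exact Mem.ofBV_zeroExtend32_u8 u.mem (stb_vorbis.stream u.mem f)
    have hb := Mem.u8_lt u.mem (stb_vorbis.stream u.mem f)
    have erax' : (s_104ca6.reg .rax).toNat = u.mem.u8 (stb_vorbis.stream u.mem f) := by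
      rw [erax]
      exact toNat_addr _ (by omega)
    constructor
    · v_untouched
    · exact ⟨hnew.1, by omega⟩
    · omega
    · intro _
      exact ⟨es, erax', by omega⟩
    · intro hge
      omega
  · -- the path through `z->eof = TRUE; return 0`
    have hge : stb_vorbis.stream_end u.mem f ≤ stb_vorbis.stream u.mem f := by u_omega
    refine ReachVia.done ?_
    refine X86.User.Returned.mk w_rip w_rsp ?_ ?_ (Vorbis.conv_code_in w_eq) ?_ ?_
    · u_saved
    · simp only [X86.User.Spec.footprint, vspec]
      u_same
    · v_inv
    show Vorbis.Spec.Get8Post Blk len (u.reg .rdi).toNat u s_104ca6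
    rw [hf]
    -- what the memory is now: only `eof` (and the stack) was stored to
    have hsf : Bits.SameFields u.mem s_104ca6.mem f := by
      constructor
      · u_memnorm
        u_eqon
      · u_memnorm
        u_eqon
      · u_memnorm
        u_eqon
      · u_memnorm
        u_eqon
    have hB : Mem.EqOn (f + 1748) (f + 1749) u.mem s_104ca6.mem := by
      u_memnorm
      u_eqon
    have hmu : mu s_104ca6.mem f = mu u.mem f :=
      mu_frame (by omega) hsf.streams hsf.segment_count hsf.next_seg hB
    have es : stb_vorbis.stream s_104ca6.mem f = stb_vorbis.stream u.mem f := by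
      simp only [vacc, voff]
      exact hsf.streams.u64 _ (by omega) (by omega) (by omega)
    have eeof : stb_vorbis.eof s_104ca6.mem f = 1 := by
      simp only [vacc, voff]
      rw [w_mem]
      simp only [vfield]
      rw [Mem.i32_writeLE_same]
      rfl
    have erax : s_104ca6.reg .rax = 0 := by
      rw [w_rax]
      rfl
    constructor
    · v_untouched
    · exact ⟨hbits.frame_fields hsf, by omega⟩
    · rw [erax]
      decide
    · intro hlt
      omega
    · intro _
      exact ⟨es, erax, eeof⟩
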